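-- pv_equiv track=rewrite | github.com/Dhruv3sood/crawler | src/core/ultils/availability_normalizer.py | normalize_availability
-- ===== SOURCE A (Python) =====
-- def normalize_availability(value) -> str:
--     if value is None:
--         return ""
--     s = str(value)
--     # handle URIs like https://schema.org/InStock or schema:InStock
--     for sep in ("/", "#", ":"):
--         if sep in s:
--             s = s.split(sep)[-1]
--     return s.strip().upper()
-- ===== SOURCE B (Python) =====
-- def normalize_availability(value) -> str:
--     if value is None:
--         return ""
--     s = str(value)
--     # suffix after the rightmost of the three separators (rfind = -1 -> whole string)
--     idx = max(s.rfind("/"), s.rfind("#"), s.rfind(":"))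
--     return s[idx + 1:].strip().upper()
-- ===== Notes on version B (the rewrite author's own statement) =====
-- stated objective: simpler
-- what changed: A's loop of three split-on-separator passes (each building a list of pieces and keeping the last) is replaced by computing the rightmost separator position once via max of three rfinds and taking a single slice.
import Mathlib
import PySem

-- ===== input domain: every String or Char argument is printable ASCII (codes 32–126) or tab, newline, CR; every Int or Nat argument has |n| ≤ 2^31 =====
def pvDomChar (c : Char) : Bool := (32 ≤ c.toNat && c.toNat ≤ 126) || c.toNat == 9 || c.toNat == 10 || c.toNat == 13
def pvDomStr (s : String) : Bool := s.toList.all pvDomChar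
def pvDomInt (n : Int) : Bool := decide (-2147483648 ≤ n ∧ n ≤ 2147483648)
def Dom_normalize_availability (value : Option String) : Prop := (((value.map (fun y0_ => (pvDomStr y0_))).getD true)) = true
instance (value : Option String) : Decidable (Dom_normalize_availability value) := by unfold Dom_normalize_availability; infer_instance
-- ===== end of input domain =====

-- B replaces A's three-pass "split on each separator, keep the last piece" loop by one
-- rightmost-separator index (max of three rfinds) and a single slice; objective: simpler.

-- ===== PORT A =====
def normalize_availability (value : Option String) : String :=
  match value with
  | none => ""
  | some v =>
    -- for sep in ("/", "#", ":"): if sep in s: s = s.split(sep)[-1]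
    -- the two .getD defaults are unreachable: split? with a nonempty sep is `some`
    -- and a split result is never empty, so s.split(sep)[-1] cannot raise
    let s := List.foldl (fun s sep =>
        if PySem.Str.isIn sep s then
          (PySem.List.pyGet? ((PySem.Str.split? s sep).getD []) (-1)).getD ""
        else s) v ["/", "#", ":"]
    PySem.Str.upper (PySem.Str.strip s)

-- ===== PORT B =====
def normalize_availability_alt (value : Option String) : String :=
  match value with
  | none => ""
  | some s =>
    -- idx = max(s.rfind("/"), s.rfind("#"), s.rfind(":")); return s[idx+1:].strip().upper()
    let idx := max (max (PySem.Str.rfind s "/") (PySem.Str.rfind s "#")) (PySem.Str.rfind s ":")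
    PySem.Str.upper (PySem.Str.strip (PySem.Str.slice s (some (idx + 1)) none))

-- ===== PRECONDITION & SPEC =====
def Spec_normalize_availability (value : Option String) (out : String) : Prop := out = normalize_availability_alt value
instance (value : Option String) (out : String) : Decidable (Spec_normalize_availability value out) := by unfold Spec_normalize_availability; infer_instance

-- ===== CLAIM (what is proved, stated in full; the proofs are below) =====
def Claim_equal_normalize_availability : Prop := ∀ (value : Option String), Dom_normalize_availability value → Spec_normalize_availability value (normalize_availability value)

-- ===== LEMMAS AND PROOFS =====

def pvTailAfter (c : Char) (l : List Char) : List Char :=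
  (l.reverse.takeWhile (fun a => a != c)).reverse

theorem pvTailAfter_of_not_mem (c : Char) (l : List Char) (h : c ∉ l) :
    pvTailAfter c l = l := by
  unfold pvTailAfter
  rw [List.takeWhile_eq_self_iff.mpr, List.reverse_reverse]
  intro a ha
  simp only [bne_iff_ne, ne_eq]
  rintro rfl
  exact h (List.mem_reverse.mp ha)

theorem pvTailAfter_cons (c ch : Char) (rest : List Char) :
    pvTailAfter c (ch :: rest) =
      if c ∈ rest then pvTailAfter c rest else (if ch = c then rest else ch :: rest) := by
  unfold pvTailAfter
  simp only [List.reverse_cons, List.takeWhile_append]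
  by_cases hm : c ∈ rest
  · simp only [hm, if_pos]
    have hne : (rest.reverse.takeWhile (fun a => a != c)).length ≠ rest.reverse.length := by
      intro hlen
      have hpre := List.takeWhile_prefix (l := rest.reverse) (fun a => a != c)
      have := hpre.eq_of_length hlen
      have hc : c ∈ rest.reverse := List.mem_reverse.mpr hm
      have := List.takeWhile_eq_self_iff.mp this c hc
      simp at this
    rw [if_neg hne]
  · have hall : rest.reverse.takeWhile (fun a => a != c) = rest.reverse := by
      apply List.takeWhile_eq_self_iff.mpr
      intro a ha
      simp only [bne_iff_ne, ne_eq]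
      rintro rfl
      exact hm (List.mem_reverse.mp ha)
    rw [hall, if_pos rfl, if_neg hm]
    by_cases hch : ch = c
    · subst hch
      simp [List.takeWhile]
    · have : ch != c := bne_iff_ne.mpr hch
      simp [List.takeWhile, this]
      exact hch

theorem pvGoLast (c : Char) (fuel : Nat) :
    ∀ (l cur : List Char) (acc : List (List Char)), l.length ≤ fuel →
    (PySem.Chars.splitOn.go [c] fuel l cur acc).getLast? =
      some (if c ∈ l then pvTailAfter c l else cur.reverse ++ l) := by
  induction fuel with
  | zero =>
    intro l cur acc hl
    have : l = [] := List.eq_nil_of_length_eq_zero (Nat.le_zero.mp hl)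
    subst this
    simp [PySem.Chars.splitOn.go, List.getLast?_reverse]
  | succ fuel ih =>
    intro l cur acc hl
    cases l with
    | nil => simp [PySem.Chars.splitOn.go, List.getLast?_reverse]
    | cons ch rest =>
      rw [PySem.Chars.splitOn.go]
      by_cases hpre : [c].isPrefixOf (ch :: rest) = true
      · have hch : ch = c := by
          simp [List.isPrefixOf] at hpre; exact hpre.symm
        rw [if_pos hpre]
        have hrec := ih (List.drop [c].length (ch :: rest)) [] (cur.reverse :: acc)
          (by simpa using Nat.lt_succ_iff.mp (by simpa using hl))
        simp only [List.length_cons, List.length_nil, Nat.zero_add, List.drop_succ_cons,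
          List.drop_zero] at hrec ⊢
        rw [hrec, pvTailAfter_cons]
        subst hch
        simp only [List.mem_cons, true_or, if_true]
        by_cases hm : ch ∈ rest
        · simp [hm]
        · simp [hm]
      · have hch : ¬ (ch = c) := by
          simp [List.isPrefixOf] at hpre
          exact fun h => hpre h.symm
        rw [if_neg hpre]
        have hrec := ih rest (ch :: cur) acc (Nat.lt_succ_iff.mp (by simpa using hl))
        rw [hrec, pvTailAfter_cons]
        have hch' : ¬ (c = ch) := fun h => hch h.symm
        by_cases hm : c ∈ rest
        · simp [hm, hch']
        · simp [hm, hch']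


theorem pvSplitOn_last (c : Char) (l : List Char) :
    (PySem.Chars.splitOn l [c]).getLast? = some (pvTailAfter c l) := by
  rw [PySem.Chars.splitOn]
  rw [pvGoLast c (l.length + 1) l [] [] (by omega)]
  by_cases hm : c ∈ l
  · rw [if_pos hm]
  · rw [if_neg hm, pvTailAfter_of_not_mem c l hm]
    rfl

theorem pvTakeWhile_stop (p : Char → Bool) :
    ∀ (l : List Char) (h : (l.takeWhile p).length < l.length),
      p (l[(l.takeWhile p).length]'h) = false := by
  intro l
  induction l with
  | nil => intro h; simp at h
  | cons a l ih =>
    intro h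
    cases hp : p a with
    | true =>
      simp only [List.takeWhile_cons, hp, if_true, List.length_cons, List.getElem_cons_succ] at h ⊢
      exact ih (by omega)
    | false =>
      simp only [List.takeWhile_cons, hp]
      exact hp

theorem pvTakeWhile_and_length (p q : Char → Bool) (m : List Char) :
    (m.takeWhile (fun a => p a && q a)).length
      = min (m.takeWhile p).length (m.takeWhile q).length := by
  induction m with
  | nil => simp
  | cons a m ih =>
    by_cases hp : p a <;> by_cases hq : q a <;>
      simp [hp, hq, ih]

theorem pvPrefixSingleton (c : Char) (m : List Char) :
    ([c].isPrefixOf m = true) ↔ m.head? = some c := by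
  cases m with
  | nil => simp
  | cons a m =>
    rw [List.isPrefixOf_cons₂]
    simp only [List.isPrefixOf, Bool.and_true, beq_iff_eq, List.head?_cons, Option.some.injEq]
    exact eq_comm

theorem pvGetRev (l : List Char) (j : Nat) (hj : j < l.length) (h2 : l.length - 1 - j < l.reverse.length) :
    l.reverse[l.length - 1 - j]'h2 = l[j]'hj := by
  rw [List.getElem_reverse]
  congr 1
  omega

theorem pvRfindGo (c : Char) (l : List Char) :
    ∀ k : Nat, k ≤ l.length →
      ((l.length : Int) - 1 - ((l.reverse.takeWhile (fun a => a != c)).length : Int)) ≤ k →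
      PySem.Chars.rfind.go l [c] k
        = (l.length : Int) - 1 - ((l.reverse.takeWhile (fun a => a != c)).length : Int) := by
  set t := (l.reverse.takeWhile (fun a => a != c)).length with ht
  have htle : t ≤ l.length := by
    simpa using (List.takeWhile_prefix (l := l.reverse) (fun a => a != c)).length_le
  -- element at index ≥ length - t is ≠ c
  have hrun : ∀ j : Nat, l.length - t ≤ j → (hj : j < l.length) → ¬ (l[j]'hj = c) := by
    intro j hjt hj hc
    have hi : l.length - 1 - j < t := by omega
    have hpre := List.takeWhile_prefix (l := l.reverse) (fun a => a != c)
    have hmem : l[j]'hj ∈ l.reverse.takeWhile (fun a => a != c) := by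
      have hrev : l.reverse[l.length - 1 - j]'(by simp; omega) = l[j]'hj :=
        pvGetRev l j hj (by simp; omega)
      have hg := hpre.getElem (i := l.length - 1 - j) (by omega)
      have e := hg.trans hrev
      exact e ▸ List.getElem_mem _
    have := List.mem_takeWhile_imp hmem
    simp [hc] at this
  have hstop : t < l.length → l[l.length - 1 - t]? = some c := by
    intro hlt
    have h1 : t < l.reverse.length := by simpa using hlt
    have h2 := pvTakeWhile_stop (fun a => a != c) l.reverse (by simpa using h1)
    rw [List.getElem_reverse] at h2
    rw [List.getElem?_eq_getElem (by omega)]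
    simp only [Option.some.injEq]
    have h3 : (l[l.length - 1 - t]'(by omega) != c) = false := h2
    simpa using h3
  intro k
  induction k with
  | zero =>
    intro hk hr
    rw [PySem.Chars.rfind.go]
    by_cases hlt : t < l.length
    · have hr0 : l.length - 1 - t = 0 := by omega
      have := hstop hlt
      rw [hr0] at this
      have hpre : [c].isPrefixOf l = true := by
        rw [pvPrefixSingleton]
        cases l with
        | nil => simp at hlt
        | cons a l => simpa using this
      simp [hpre]
      omega
    · have hteq : t = l.length := by omega
      have hpre : [c].isPrefixOf l = false := by
        rw [Bool.eq_false_iff, ne_eq, pvPrefixSingleton]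
        cases l with
        | nil => simp
        | cons a l =>
          simp only [List.head?_cons, Option.some.injEq]
          exact hrun 0 (by omega) (by simp)
      simp [hpre]
      omega
  | succ k ih =>
    intro hk hr
    rw [PySem.Chars.rfind.go]
    by_cases heq : (l.length : Int) - 1 - t = (k + 1 : Nat)
    · have hklt : k + 1 < l.length := by omega
      have hidx : l.length - 1 - t = k + 1 := by omega
      have := hstop (by omega)
      rw [hidx] at this
      have hpre : [c].isPrefixOf (l.drop (k+1)) = true := by
        rw [pvPrefixSingleton, List.head?_drop]
        exact this
      simp only [hpre, if_true]
      omega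
    · have hlt' : (l.length : Int) - 1 - t ≤ k := by omega
      have hpre : [c].isPrefixOf (l.drop (k+1)) = false := by
        rw [Bool.eq_false_iff, ne_eq, pvPrefixSingleton, List.head?_drop]
        by_cases hin : k + 1 < l.length
        · rw [List.getElem?_eq_getElem hin]
          simp only [Option.some.injEq]
          exact hrun (k+1) (by omega) hin
        · rw [List.getElem?_eq_none (by omega)]
          simp
      simp only [hpre]
      simpa using ih (by omega) hlt'

theorem pvRfind_single (c : Char) (l : List Char) :
    PySem.Chars.rfind l [c]
      = (l.length : Int) - 1 - ((l.reverse.takeWhile (fun a => a != c)).length : Int) := by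
  rw [PySem.Chars.rfind]
  exact pvRfindGo c l l.length le_rfl (by
    have := (List.takeWhile_prefix (l := l.reverse) (fun a => a != c)).length_le
    simp only [List.length_reverse] at this
    omega)

theorem pvPyGet_neg_one {α : Type} (xs : List α) (h : xs ≠ []) :
    PySem.List.pyGet? xs (-1) = xs.getLast? := by
  have hn : 1 ≤ xs.length := List.length_pos_of_ne_nil h
  simp only [PySem.List.pyGet?, PySem.List.pyIdx?]
  rw [if_neg (by omega), if_pos (by exact_mod_cast by omega)]
  simp only [Option.bind_some]
  rw [List.getLast?_eq_getElem?]
  norm_num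

theorem pvStepA (s sep : String) (c : Char) (hsep : sep.toList = [c]) :
    (if PySem.Str.isIn sep s then
        (PySem.List.pyGet? ((PySem.Str.split? s sep).getD []) (-1)).getD "" else s).toList
      = pvTailAfter c s.toList := by
  by_cases h : PySem.Str.isIn sep s
  · rw [if_pos h]
    have hsplit := PySem.Str.split?_map s sep
    rw [hsep] at hsplit
    rw [PySem.Chars.split?, if_neg (by simp)] at hsplit
    obtain ⟨parts, hp⟩ : ∃ parts, PySem.Str.split? s sep = some parts := by
      cases hps : PySem.Str.split? s sep with
      | none => rw [hps] at hsplit; simp at hsplit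
      | some parts => exact ⟨parts, rfl⟩
    rw [hp] at hsplit ⊢
    simp only [Option.map_some, Option.some.injEq] at hsplit
    have hlast : (parts.map String.toList).getLast? = some (pvTailAfter c s.toList) := by
      rw [hsplit]; exact pvSplitOn_last c s.toList
    have hne : parts ≠ [] := by
      intro he; rw [he] at hlast; simp at hlast
    rw [Option.getD_some, pvPyGet_neg_one parts hne]
    rw [List.getLast?_map] at hlast
    cases hlp : parts.getLast? with
    | none => rw [hlp] at hlast; simp at hlast
    | some x =>
      rw [hlp] at hlast
      simp only [Option.map_some, Option.some.injEq] at hlast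
      simpa using hlast
  · rw [if_neg h]
    apply (pvTailAfter_of_not_mem c s.toList ?_).symm
    intro hc
    apply h
    rw [PySem.Str.isIn_eq, hsep]
    rw [PySem.Chars.isIn_iff_infix]
    exact (List.singleton_infix_iff c s.toList).mpr hc

theorem pvMain (v : String) : normalize_availability (some v) = normalize_availability_alt (some v) := by
  simp only [normalize_availability, normalize_availability_alt, List.foldl_cons, List.foldl_nil]
  set l := v.toList with hl
  refine congrArg _ (congrArg _ ?_)
  apply String.toList_inj.mp
  -- A side to tailAfter chain
  rw [pvStepA _ ":" ':' (by decide), pvStepA _ "#" '#' (by decide), pvStepA _ "/" '/' (by decide)]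
  -- B side
  rw [PySem.Str.toList_slice]
  simp only [PySem.Chars.slice_eq_listSlice]
  have hr : ∀ c : Char, ∀ t : String, t.toList = [c] → PySem.Str.rfind v t
      = (l.length : Int) - 1 - ((l.reverse.takeWhile (fun a => a != c)).length : Int) := by
    intro c t ht
    rw [PySem.Str.rfind_eq, ht, ← hl]
    exact pvRfind_single c l
  rw [hr '/' "/" (by decide), hr '#' "#" (by decide), hr ':' ":" (by decide)]
  set t1 := (l.reverse.takeWhile (fun a => a != '/')).length with ht1
  set t2 := (l.reverse.takeWhile (fun a => a != '#')).length with ht2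
  set t3 := (l.reverse.takeWhile (fun a => a != ':')).length with ht3
  set P : Char → Bool := fun a => ((a != '/') && (a != '#')) && (a != ':') with hP
  have hT : (l.reverse.takeWhile P).length = min (min t1 t2) t3 := by
    rw [hP]
    rw [pvTakeWhile_and_length (fun a => (a != '/') && (a != '#')) (fun a => a != ':')]
    rw [pvTakeWhile_and_length (fun a => a != '/') (fun a => a != '#')]
  set T := (l.reverse.takeWhile P).length with hTd
  have hTle : T ≤ l.length := by
    have := (List.takeWhile_prefix (l := l.reverse) P).length_le
    simpa [← hTd] using this
  have hidx : max (max ((l.length:Int) - 1 - t1) ((l.length:Int) - 1 - t2)) ((l.length:Int) - 1 - t3) + 1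
      = ((l.length - T : Nat) : Int) := by
    have ht1l : t1 ≤ l.length := by
      have := (List.takeWhile_prefix (l := l.reverse) (fun a => a != '/')).length_le
      simp only [List.length_reverse] at this; omega
    omega
  rw [hidx]
  rw [PySem.List.slice_from_natCast]
  -- A chain = reverse (takeWhile P l.reverse)
  have hA : pvTailAfter ':' (pvTailAfter '#' (pvTailAfter '/' l)) = (l.reverse.takeWhile P).reverse := by
    unfold pvTailAfter
    rw [List.reverse_reverse, List.reverse_reverse]
    rw [List.takeWhile_takeWhile, List.takeWhile_takeWhile]
    have hfun : (fun a : Char => decide (decide ((a != ':') = true ∧ (a != '#') = true) = true ∧ (a != '/') = true)) = P := by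
      funext a
      rw [hP]
      cases h1 : a == '/' <;> cases h2 : a == '#' <;> cases h3 : a == ':' <;>
        simp [bne, h1, h2, h3]
    rw [hfun]
  rw [hA]
  -- B drop = same
  have hBtake : l.reverse.takeWhile P = l.reverse.take T := by
    have := List.takeWhile_prefix (l := l.reverse) P
    exact List.prefix_iff_eq_take.mp this
  rw [hBtake, List.take_reverse]
  simp only [List.reverse_reverse]
  rw [← hl]

-- ===== VERDICT (by name: the statement is the Claim_ definition above) =====
theorem normalize_availability_spec : Claim_equal_normalize_availability := by
  intro value _
  unfold Spec_normalize_availability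
  cases value with
  | none => simp only [normalize_availability, normalize_availability_alt]
  | some v => exact pvMain v
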